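-- pv_equiv track=rewrite | github.com/dariusnguyen/algorithm_data_structure_replit | aaa_Amazon/nonRepeatingSegments.py | nonRepeatingSegments
-- ===== SOURCE A (Python) =====
-- def nonRepeatingSegments(s):
-- 	found = set()
-- 	segment = ''
-- 	res = []
-- 	for i in s:
-- 		if i in found:
-- 			res.append(segment)
-- 			segment = ''
-- 			found = set()
-- 		found.add(i)
-- 		segment += i
--
-- 	if segment != '':
-- 		res.append(segment)
-- 	return res
-- ===== SOURCE B (Python) =====
-- def nonRepeatingSegments(s):
--     res = []
--     i = 0
--     n = len(s)
--     while i < n: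
--         seen = {s[i]}
--         j = i + 1
--         while j < n and s[j] not in seen:
--             seen.add(s[j])
--             j += 1
--         res.append(s[i:j])
--         i = j
--     return res
-- ===== Notes on version B (the rewrite author's own statement) =====
-- stated objective: alternative
-- what changed: A makes one pass carrying a set that it resets and a growing segment string; B uses a nested index loop: for each segment start it greedily extends an end index with a fresh set and emits the slice s[i:j].
import Mathlib
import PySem

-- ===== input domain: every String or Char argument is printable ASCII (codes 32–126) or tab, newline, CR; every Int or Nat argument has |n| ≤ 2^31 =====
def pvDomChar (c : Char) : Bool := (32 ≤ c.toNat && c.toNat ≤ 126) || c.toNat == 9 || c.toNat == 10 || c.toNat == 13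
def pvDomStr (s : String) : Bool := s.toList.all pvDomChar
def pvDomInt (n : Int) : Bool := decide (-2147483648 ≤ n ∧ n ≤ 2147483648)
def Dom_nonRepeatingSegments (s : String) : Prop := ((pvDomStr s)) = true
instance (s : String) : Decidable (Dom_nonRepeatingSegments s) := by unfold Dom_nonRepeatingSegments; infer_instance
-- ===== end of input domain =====

-- B restates A's single pass (set reset on repeat) as a nested loop emitting maximal slices; same cost, different decomposition.

-- ===== PORT A =====
-- A's loop: state = (found, segment, res); segment kept as List Char, res as List (List Char), String.mk at the end.
def goA : List Char → PySem.Set Char → List Char → List (List Char) → List (List Char)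
  | [], _, segment, res => if segment ≠ [] then res ++ [segment] else res
  | c :: rest, found, segment, res =>
    if PySem.Set.contains found c then
      goA rest (PySem.Set.add PySem.Set.empty c) [c] (res ++ [segment])
    else
      goA rest (PySem.Set.add found c) (segment ++ [c]) res

def nonRepeatingSegments (s : String) : List String :=
  (goA s.toList PySem.Set.empty [] []).map String.mk

-- ===== PORT B =====
-- B's inner while: extend the current segment while the next char is fresh; returns (segment tail, rest).
def extB (seen : PySem.Set Char) : List Char → List Char × List Char
  | [] => ([], [])
  | c :: rest =>
    if PySem.Set.contains seen c then ([], c :: rest)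
    else
      let p := extB (PySem.Set.add seen c) rest
      (c :: p.1, p.2)

theorem extB_len (seen : PySem.Set Char) (cs : List Char) :
    (extB seen cs).2.length ≤ cs.length := by
  induction cs generalizing seen with
  | nil => simp [extB]
  | cons c rest ih =>
    simp only [extB]
    split
    · simp
    · exact Nat.le_succ_of_le (ih _)

-- B's outer while over segment starts.
def goB : List Char → List (List Char)
  | [] => []
  | c :: rest =>
    let p := extB (PySem.Set.add PySem.Set.empty c) rest
    (c :: p.1) :: goB p.2
termination_by cs => cs.length
decreasing_by exact Nat.lt_succ_of_le (extB_len _ _)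

def nonRepeatingSegments_alt (s : String) : List String :=
  (goB s.toList).map String.mk

-- ===== PRECONDITION & SPEC =====
def Spec_nonRepeatingSegments (s : String) (out : List String) : Prop := out = nonRepeatingSegments_alt s
instance (s : String) (out : List String) : Decidable (Spec_nonRepeatingSegments s out) := by unfold Spec_nonRepeatingSegments; infer_instance

-- ===== CLAIM (what is proved, stated in full; the proofs are below) =====
def Claim_equal_nonRepeatingSegments : Prop := ∀ (s : String), Dom_nonRepeatingSegments s → Spec_nonRepeatingSegments s (nonRepeatingSegments s)

-- ===== LEMMAS AND PROOFS =====

theorem goA_res (cs : List Char) (found : PySem.Set Char) (seg : List Char)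
    (res : List (List Char)) : goA cs found seg res = res ++ goA cs found seg [] := by
  induction cs generalizing found seg res with
  | nil => simp only [goA]; split <;> simp
  | cons c rest ih =>
    simp only [goA]
    split
    · rw [ih, ih (res := [] ++ [seg])]; simp
    · exact ih _ _ _

theorem goA_eq (cs : List Char) (found : PySem.Set Char) (seg : List Char) (h : seg ≠ []) :
    goA cs found seg [] = (seg ++ (extB found cs).1) :: goB (extB found cs).2 := by
  induction cs generalizing found seg with
  | nil => simp [goA, extB, goB, h]
  | cons c rest ih =>
    simp only [goA, extB]
    split
    · rw [goA_res, ih _ [c] (by simp)]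
      simp [goB]
    · rw [ih _ (seg ++ [c]) (by simp)]
      simp

-- ===== VERDICT (by name: the statement is the Claim_ definition above) =====
theorem nonRepeatingSegments_spec : Claim_equal_nonRepeatingSegments := by
  intro s _
  unfold Spec_nonRepeatingSegments nonRepeatingSegments nonRepeatingSegments_alt
  cases hcs : s.toList with
  | nil => simp [goA, goB]
  | cons c rest =>
    simp only [goA, goB]
    rw [show PySem.Set.contains PySem.Set.empty c = false from rfl]
    simp only [Bool.false_eq_true, if_false, List.nil_append]
    rw [goA_eq _ _ [c] (by simp)]
    rfl
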